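-- pv_equiv track=rewrite | github.com/pypi-data/pypi-mirror-362 | packages/remap-badblocks/remap_badblocks-0.7.tar.gz/remap_badblocks-0.7/src/remap_badblocks/src/badblocks/_remap_badblocks.py | identify_simplifiable_couple_in_mapping
-- ===== SOURCE A (Python) =====
-- from typing import Iterable, Iterator, Optional, Union
--
-- def identify_simplifiable_couple_in_mapping(
--     mapping: list[tuple[int, int, int]],
-- ) -> Optional[tuple[int, int]]:
--     for i, (start_virtual_0, start_real_0, length_0) in enumerate(mapping[:-1]):
--         end_virtual_0 = start_virtual_0 + length_0
--         end_real_0 = start_real_0 + length_0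
--         for _j, (start_virtual_1, start_real_1, length_1) in enumerate(
--             mapping[i + 1 :]
--         ):
--             j = _j + i + 1
--             end_virtual_1 = start_virtual_1 + length_1
--             end_real_1 = start_real_1 + length_1
--             if (start_virtual_0 == end_virtual_1) and (start_real_0 == end_real_1):
--                 return j, i
--             if (start_virtual_1 == end_virtual_0) and (start_real_1 == end_real_0):
--                 return i, j
--     return None
-- ===== SOURCE B (Python) =====
-- def identify_simplifiable_couple_in_mapping(mapping):
--     # Single backward pass: hash maps give, for each i, the smallest j > i whose
--     # interval starts at i's end / ends at i's start; overwriting 'best' as i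
--     # decreases leaves the answer for the smallest such i, matching A's scan order.
--     start_min = {}  # (start_virtual, start_real) -> smallest index seen so far
--     end_min = {}    # (end_virtual, end_real)   -> smallest index seen so far
--     best = None
--     for i, (start_virtual, start_real, length) in reversed(list(enumerate(mapping))):
--         skey = (start_virtual, start_real)
--         ekey = (start_virtual + length, start_real + length)
--         j1 = end_min.get(skey)    # smallest j > i with end_j == start_i
--         j2 = start_min.get(ekey)  # smallest j > i with start_j == end_i
--         if j1 is not None and (j2 is None or j1 <= j2):
--             best = (j1, i)
--         elif j2 is not None:
--             best = (i, j2)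
--         start_min[skey] = i
--         end_min[ekey] = i
--     return best
-- ===== Notes on version B (the rewrite author's own statement) =====
-- stated objective: faster
-- what changed: Replaces the nested forward scan over all pairs by a single backward pass that maintains two hash maps from (start,start) / (end,end) key pairs to the smallest index seen, so each index gets its best partner in O(1).
import Mathlib
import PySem

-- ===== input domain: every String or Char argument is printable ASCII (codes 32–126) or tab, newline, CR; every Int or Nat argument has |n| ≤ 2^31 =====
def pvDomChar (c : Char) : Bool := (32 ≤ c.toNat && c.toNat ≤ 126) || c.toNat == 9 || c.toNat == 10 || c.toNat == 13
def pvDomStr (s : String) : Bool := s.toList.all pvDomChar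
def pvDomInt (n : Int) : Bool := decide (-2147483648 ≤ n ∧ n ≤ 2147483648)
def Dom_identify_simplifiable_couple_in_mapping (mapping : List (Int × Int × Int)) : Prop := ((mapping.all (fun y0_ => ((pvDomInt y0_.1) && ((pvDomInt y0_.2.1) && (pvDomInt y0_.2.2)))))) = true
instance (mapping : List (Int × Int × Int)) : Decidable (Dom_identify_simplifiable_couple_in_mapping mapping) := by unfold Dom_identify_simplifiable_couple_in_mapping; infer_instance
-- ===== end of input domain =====

-- B replaces A's O(n^2) nested pair scan by one backward pass with two hash maps
-- (key -> smallest index seen); equality of the return values is proved below.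

-- ===== PORT A =====
-- inner loop: for _j, (sv1, sr1, l1) in enumerate(mapping[i+1:]) — the suffix is the list argument
def pvInnerA (sv0 sr0 ev0 er0 i _j : Int) : List (Int × Int × Int) → Option (Int × Int)
  | [] => none
  | (sv1, sr1, l1) :: rest =>
    let j := _j + i + 1
    let ev1 := sv1 + l1
    let er1 := sr1 + l1
    if sv0 = ev1 ∧ sr0 = er1 then some (j, i)
    else if sv1 = ev0 ∧ sr1 = er0 then some (i, j)
    else pvInnerA sv0 sr0 ev0 er0 i (_j + 1) rest

-- outer loop: for i, (sv0, sr0, l0) in enumerate(mapping[:-1]) — the [:-1] is the `[_]` case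
def pvOuterA (i : Int) : List (Int × Int × Int) → Option (Int × Int)
  | [] => none
  | [_] => none
  | (sv0, sr0, l0) :: rest =>
    let ev0 := sv0 + l0
    let er0 := sr0 + l0
    match pvInnerA sv0 sr0 ev0 er0 i 0 rest with
    | some r => some r
    | none => pvOuterA (i + 1) rest

def identify_simplifiable_couple_in_mapping (mapping : List (Int × Int × Int)) : Option (Int × Int) :=
  pvOuterA 0 mapping

-- ===== PORT B =====
-- one iteration of: for i, (sv, sr, length) in reversed(list(enumerate(mapping)))
def pvStepB
    (st : PySem.Dict (Int × Int) Int × PySem.Dict (Int × Int) Int × Option (Int × Int))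
    (p : Int × (Int × Int × Int)) :
    PySem.Dict (Int × Int) Int × PySem.Dict (Int × Int) Int × Option (Int × Int) :=
  let start_min := st.1
  let end_min := st.2.1
  let best := st.2.2
  let i := p.1
  let skey := (p.2.1, p.2.2.1)
  let ekey := (p.2.1 + p.2.2.2, p.2.2.1 + p.2.2.2)
  let j1 := end_min.get? skey
  let j2 := start_min.get? ekey
  let best' :=
    match j1, j2 with
    | some a, none => some (a, i)
    | some a, some b => if a ≤ b then some (a, i) else some (i, b)
    | none, some b => some (i, b)
    | none, none => best
  (start_min.insert skey i, end_min.insert ekey i, best')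

def identify_simplifiable_couple_in_mapping_alt (mapping : List (Int × Int × Int)) : Option (Int × Int) :=
  (((PySem.List.enumerate mapping).reverse).foldl pvStepB (PySem.Dict.empty, PySem.Dict.empty, none)).2.2

-- ===== PRECONDITION & SPEC =====
def Spec_identify_simplifiable_couple_in_mapping (mapping : List (Int × Int × Int)) (out : Option (Int × Int)) : Prop := out = identify_simplifiable_couple_in_mapping_alt mapping
instance (mapping : List (Int × Int × Int)) (out : Option (Int × Int)) : Decidable (Spec_identify_simplifiable_couple_in_mapping mapping out) := by unfold Spec_identify_simplifiable_couple_in_mapping; infer_instance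

-- ===== CLAIM (what is proved, stated in full; the proofs are below) =====
def Claim_equal_identify_simplifiable_couple_in_mapping : Prop := ∀ (mapping : List (Int × Int × Int)), Dom_identify_simplifiable_couple_in_mapping mapping → Spec_identify_simplifiable_couple_in_mapping mapping (identify_simplifiable_couple_in_mapping mapping)

-- ===== LEMMAS AND PROOFS =====

-- smallest index (counting from i) in the list whose START key is k
def pvMinS (i : Int) (k : Int × Int) : List (Int × Int × Int) → Option Int
  | [] => none
  | (sv, sr, _) :: t => if ((sv, sr) : Int × Int) = k then some i else pvMinS (i + 1) k t

-- smallest index (counting from i) in the list whose END key is k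
def pvMinE (i : Int) (k : Int × Int) : List (Int × Int × Int) → Option Int
  | [] => none
  | (sv, sr, l) :: t => if ((sv + l, sr + l) : Int × Int) = k then some i else pvMinE (i + 1) k t

-- B's choice rule between the two candidate partners of index i
def pvComb (i : Int) (j1 j2 : Option Int) (prev : Option (Int × Int)) : Option (Int × Int) :=
  match j1, j2 with
  | some a, none => some (a, i)
  | some a, some b => if a ≤ b then some (a, i) else some (i, b)
  | none, some b => some (i, b)
  | none, none => prev

-- common functional spec: result considering only pairs whose first index is ≥ i
def pvFF (i : Int) : List (Int × Int × Int) → Option (Int × Int)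
  | [] => none
  | (sv, sr, l) :: t =>
    pvComb i (pvMinE (i + 1) (sv, sr) t) (pvMinS (i + 1) (sv + l, sr + l) t) (pvFF (i + 1) t)

theorem pvFF_cons (i sv sr l : Int) (t : List (Int × Int × Int)) :
    pvFF i ((sv, sr, l) :: t) =
      pvComb i (pvMinE (i + 1) (sv, sr) t) (pvMinS (i + 1) (sv + l, sr + l) t) (pvFF (i + 1) t) := rfl

theorem pvOuterA_cons2 (i sv0 sr0 l0 : Int) (y : Int × Int × Int) (u : List (Int × Int × Int)) :
    pvOuterA i ((sv0, sr0, l0) :: y :: u) =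
      match pvInnerA sv0 sr0 (sv0 + l0) (sr0 + l0) i 0 (y :: u) with
      | some r => some r
      | none => pvOuterA (i + 1) (y :: u) := rfl

theorem pvMinS_ge {i v : Int} {k : Int × Int} {l : List (Int × Int × Int)}
    (h : pvMinS i k l = some v) : i ≤ v := by
  induction l generalizing i with
  | nil => simp [pvMinS] at h
  | cons x t ih =>
    obtain ⟨sv, sr, ln⟩ := x
    simp only [pvMinS] at h
    split at h
    · injection h with h; omega
    · have := ih h; omega

theorem pvMinE_ge {i v : Int} {k : Int × Int} {l : List (Int × Int × Int)}
    (h : pvMinE i k l = some v) : i ≤ v := by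
  induction l generalizing i with
  | nil => simp [pvMinE] at h
  | cons x t ih =>
    obtain ⟨sv, sr, ln⟩ := x
    simp only [pvMinE] at h
    split at h
    · injection h with h; omega
    · have := ih h; omega

theorem pvInnerA_eq (sv0 sr0 l0 i : Int) (_j : Int) (l : List (Int × Int × Int)) :
    pvInnerA sv0 sr0 (sv0 + l0) (sr0 + l0) i _j l =
      pvComb i (pvMinE (_j + i + 1) (sv0, sr0) l)
               (pvMinS (_j + i + 1) (sv0 + l0, sr0 + l0) l) none := by
  induction l generalizing _j with
  | nil => simp [pvInnerA, pvMinS, pvMinE, pvComb]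
  | cons x t ih =>
    obtain ⟨sv1, sr1, l1⟩ := x
    simp only [pvInnerA, pvMinS, pvMinE]
    by_cases h1 : sv0 = sv1 + l1 ∧ sr0 = sr1 + l1
    · -- condition 1 fires at this j
      have hk : ((sv1 + l1, sr1 + l1) : Int × Int) = (sv0, sr0) := by
        obtain ⟨h1a, h1b⟩ := h1; simp [h1a, h1b]
      rw [if_pos h1, if_pos hk]
      by_cases h2 : ((sv1, sr1) : Int × Int) = (sv0 + l0, sr0 + l0)
      · rw [if_pos h2]
        simp only [pvComb, if_pos (le_refl (_j + i + 1))]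
      · rw [if_neg h2]
        rcases hS : pvMinS (_j + i + 1 + 1) (sv0 + l0, sr0 + l0) t with _ | v
        · simp [pvComb]
        · have := pvMinS_ge hS
          simp only [pvComb]
          rw [if_pos (by omega)]
    · -- condition 1 does not fire
      have hk : ((sv1 + l1, sr1 + l1) : Int × Int) ≠ (sv0, sr0) := by
        intro he
        injection he with ha hb
        exact h1 ⟨ha.symm, hb.symm⟩
      rw [if_neg h1, if_neg hk]
      by_cases h2 : sv1 = sv0 + l0 ∧ sr1 = sr0 + l0
      · -- condition 2 fires at this j
        have hk2 : ((sv1, sr1) : Int × Int) = (sv0 + l0, sr0 + l0) := by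
          obtain ⟨h2a, h2b⟩ := h2; simp [h2a, h2b]
        rw [if_pos h2, if_pos hk2]
        rcases hE : pvMinE (_j + i + 1 + 1) (sv0, sr0) t with _ | v
        · simp [pvComb]
        · have := pvMinE_ge hE
          simp only [pvComb]
          rw [if_neg (by omega)]
      · have hk2 : ((sv1, sr1) : Int × Int) ≠ (sv0 + l0, sr0 + l0) := by
          intro he
          injection he with ha hb
          exact h2 ⟨ha, hb⟩
        rw [if_neg h2, if_neg hk2]
        have := ih (_j + 1)
        rw [show _j + 1 + i + 1 = _j + i + 1 + 1 by omega] at this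
        exact this

theorem pvOuterA_eq (i : Int) (l : List (Int × Int × Int)) :
    pvOuterA i l = pvFF i l := by
  induction l generalizing i with
  | nil => simp [pvOuterA, pvFF]
  | cons x t ih =>
    obtain ⟨sv0, sr0, l0⟩ := x
    cases t with
    | nil => simp [pvOuterA, pvFF, pvMinS, pvMinE, pvComb]
    | cons y u =>
      rw [pvOuterA_cons2, pvFF_cons,
          pvInnerA_eq sv0 sr0 l0 i 0 (y :: u),
          show (0 : Int) + i + 1 = i + 1 by omega, ← ih (i + 1)]
      rcases pvMinE (i + 1) (sv0, sr0) (y :: u) with _ | a <;>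
        rcases pvMinS (i + 1) (sv0 + l0, sr0 + l0) (y :: u) with _ | b <;>
        simp only [pvComb] <;> try rfl
      split_ifs <;> rfl

-- the backward fold of B maintains: both maps give the minimal matching index ≥ i,
-- and `best` is pvFF i l
theorem pvB_inv (l : List (Int × Int × Int)) (i : Int) :
    (∀ k, ((PySem.List.enumerate l i).foldr (fun p st => pvStepB st p)
            (PySem.Dict.empty, PySem.Dict.empty, none)).1.get? k = pvMinS i k l) ∧
    (∀ k, ((PySem.List.enumerate l i).foldr (fun p st => pvStepB st p)
            (PySem.Dict.empty, PySem.Dict.empty, none)).2.1.get? k = pvMinE i k l) ∧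
    ((PySem.List.enumerate l i).foldr (fun p st => pvStepB st p)
            (PySem.Dict.empty, PySem.Dict.empty, none)).2.2 = pvFF i l := by
  induction l generalizing i with
  | nil =>
    simp [PySem.List.enumerate_nil, pvMinS, pvMinE, pvFF, PySem.Dict.get?_empty]
  | cons x t ih =>
    obtain ⟨sv, sr, ln⟩ := x
    obtain ⟨ihS, ihE, ihB⟩ := ih (i + 1)
    rw [PySem.List.enumerate_cons]
    simp only [List.foldr_cons]
    set st := (PySem.List.enumerate t (i + 1)).foldr (fun p st => pvStepB st p)
      (PySem.Dict.empty, PySem.Dict.empty, none) with hst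
    refine ⟨?_, ?_, ?_⟩
    · intro k
      simp only [pvStepB, PySem.Dict.get?_insert]
      rw [pvMinS]
      split
      · next h => rw [if_pos (by simpa using h.symm)]
      · next h => rw [if_neg (by simpa using fun he => h he.symm), ihS]
    · intro k
      simp only [pvStepB, PySem.Dict.get?_insert]
      rw [pvMinE]
      split
      · next h => rw [if_pos (by simpa using h.symm)]
      · next h => rw [if_neg (by simpa using fun he => h he.symm), ihE]
    · simp only [pvStepB]
      rw [ihS, ihE, ihB, pvFF_cons]
      rfl

-- ===== VERDICT (by name: the statement is the Claim_ definition above) =====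
theorem identify_simplifiable_couple_in_mapping_spec : Claim_equal_identify_simplifiable_couple_in_mapping := by
  intro mapping _hdom
  unfold Spec_identify_simplifiable_couple_in_mapping
  unfold identify_simplifiable_couple_in_mapping identify_simplifiable_couple_in_mapping_alt
  rw [List.foldl_reverse]
  rw [(pvB_inv mapping 0).2.2, pvOuterA_eq]
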